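-- pv_equiv track=rewrite | github.com/M1k3ez/burnsideseatingplanner | MyISPl/teacher.py | generate_default_chairs
-- ===== SOURCE A (Python) =====
-- def generate_default_chairs(canvas_width, canvas_height, student_count):
--     """
--     Complex algorithm that generates an optimal layout of chairs:
--     - Calculates grid dimensions based on canvas size
--     - Handles dynamic spacing and margins
--     - Centers the entire layout
--     - Supports both portrait and landscape orientations
--     """
--     CHAIR_WIDTH = 120
--     CHAIR_HEIGHT = 120
--     MARGIN = 20
--     # Calculate maximum chairs per row based on canvas width
--     max_chairs_per_row = (canvas_width - MARGIN) // (CHAIR_WIDTH + MARGIN)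
--     # Calculate required number of rows
--     num_rows = (student_count + max_chairs_per_row - 1) // max_chairs_per_row
--     # Calculate total width and height of chair layout
--     total_width = min(max_chairs_per_row, student_count) * (
--         CHAIR_WIDTH + MARGIN) - MARGIN
--     total_height = num_rows * (CHAIR_HEIGHT + MARGIN) - MARGIN
--     # Center the layout on canvas
--     start_x = (canvas_width - total_width) // 2
--     start_y = (canvas_height - total_height) // 2
--     # Generate chair positions
--     chairs = []
--     chair_id = 1
--     for row in range(num_rows):
--         # Handle last row with potentially fewer chairs
--         chairs_in_row = min(
--             max_chairs_per_row,
--             student_count - row * max_chairs_per_row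
--         )
--         for col in range(chairs_in_row):
--             chairs.append({
--                 'id': chair_id,
--                 'x': start_x + col * (CHAIR_WIDTH + MARGIN),
--                 'y': start_y + row * (CHAIR_HEIGHT + MARGIN)
--             })
--             chair_id += 1
--     return chairs
-- ===== SOURCE B (Python) =====
-- def generate_default_chairs(canvas_width, canvas_height, student_count):
--     """Flat single-pass layout: one loop over chair indices with divmod instead of nested row/col loops."""
--     CHAIR_WIDTH = 120
--     CHAIR_HEIGHT = 120
--     MARGIN = 20
--     step = CHAIR_WIDTH + MARGIN
--     per_row = (canvas_width - MARGIN) // step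
--     if per_row <= 0:
--         # no chair fits in a row: nothing to place
--         return []
--     num_rows = -(-student_count // per_row)  # ceiling division
--     start_x = (canvas_width - (min(per_row, student_count) * step - MARGIN)) // 2
--     start_y = (canvas_height - (num_rows * (CHAIR_HEIGHT + MARGIN) - MARGIN)) // 2
--     return [
--         {'id': i + 1,
--          'x': start_x + (i % per_row) * step,
--          'y': start_y + (i // per_row) * (CHAIR_HEIGHT + MARGIN)}
--         for i in range(student_count)
--     ]
-- ===== Notes on version B (the rewrite author's own statement) =====
-- stated objective: simpler
-- what changed: Replaces the nested row/column loops with per-row chair counting by a single flat pass over chair indices using divmod (ceiling division for num_rows, an explicit guard when no chair fits per row), building each chair from its index alone. (Pre_ excludes only canvases where A raises ZeroDivisionError; B returns [] there.)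
import Mathlib
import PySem

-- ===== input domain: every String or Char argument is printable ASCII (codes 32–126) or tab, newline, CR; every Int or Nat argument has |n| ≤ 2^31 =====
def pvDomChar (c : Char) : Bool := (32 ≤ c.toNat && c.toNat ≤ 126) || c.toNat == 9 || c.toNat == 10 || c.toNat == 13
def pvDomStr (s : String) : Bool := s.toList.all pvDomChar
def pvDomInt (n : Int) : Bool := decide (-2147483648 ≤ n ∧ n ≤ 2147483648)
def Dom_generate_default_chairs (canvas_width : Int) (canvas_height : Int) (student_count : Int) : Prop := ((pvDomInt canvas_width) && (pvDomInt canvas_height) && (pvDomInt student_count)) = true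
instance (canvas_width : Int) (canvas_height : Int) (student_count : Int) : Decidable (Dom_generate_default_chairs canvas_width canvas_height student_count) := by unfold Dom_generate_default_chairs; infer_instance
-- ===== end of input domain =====

-- B replaces A's nested row/column loops by one flat pass over chair indices using divmod (simpler decomposition, same cost);
-- where A raises ZeroDivisionError (no chair fits per row, excluded by Pre_) B returns [].


-- ===== PORT A =====
def generate_default_chairs (canvas_width : Int) (canvas_height : Int) (student_count : Int) : List (List (String × Int)) :=
  let CHAIR_WIDTH : Int := 120
  let CHAIR_HEIGHT : Int := 120
  let MARGIN : Int := 20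
  let max_chairs_per_row := PySem.Int.floordiv (canvas_width - MARGIN) (CHAIR_WIDTH + MARGIN)
  let num_rows := PySem.Int.floordiv (student_count + max_chairs_per_row - 1) max_chairs_per_row
  let total_width := min max_chairs_per_row student_count * (CHAIR_WIDTH + MARGIN) - MARGIN
  let total_height := num_rows * (CHAIR_HEIGHT + MARGIN) - MARGIN
  let start_x := PySem.Int.floordiv (canvas_width - total_width) 2
  let start_y := PySem.Int.floordiv (canvas_height - total_height) 2
  let st := (PySem.List.pyRange 0 num_rows 1).foldl
    (fun (st : List (List (String × Int)) × Int) row =>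
      let chairs_in_row := min max_chairs_per_row (student_count - row * max_chairs_per_row)
      (PySem.List.pyRange 0 chairs_in_row 1).foldl
        (fun (st2 : List (List (String × Int)) × Int) col =>
          (st2.1 ++ [[("id", st2.2),
                      ("x", start_x + col * (CHAIR_WIDTH + MARGIN)),
                      ("y", start_y + row * (CHAIR_HEIGHT + MARGIN))]], st2.2 + 1)) st)
    ([], 1)
  st.1

-- ===== PORT B =====
def generate_default_chairs_alt (canvas_width : Int) (canvas_height : Int) (student_count : Int) : List (List (String × Int)) :=
  let step : Int := 120 + 20
  let per_row := PySem.Int.floordiv (canvas_width - 20) step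
  if per_row ≤ 0 then []
  else
    let num_rows := -(PySem.Int.floordiv (-student_count) per_row)
    let start_x := PySem.Int.floordiv (canvas_width - (min per_row student_count * step - 20)) 2
    let start_y := PySem.Int.floordiv (canvas_height - (num_rows * (120 + 20) - 20)) 2
    (PySem.List.pyRange 0 student_count 1).map (fun i =>
      [("id", i + 1),
       ("x", start_x + (PySem.Int.mod i per_row) * step),
       ("y", start_y + (PySem.Int.floordiv i per_row) * (120 + 20))])

-- ===== PRECONDITION & SPEC =====
-- Pre_ excludes exactly the inputs on which A raises ZeroDivisionError: canvases where no chair fits in a row.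
def Pre_generate_default_chairs (canvas_width : Int) (canvas_height : Int) (student_count : Int) : Prop :=
  PySem.Int.floordiv (canvas_width - 20) 140 ≠ 0
instance (canvas_width : Int) (canvas_height : Int) (student_count : Int) : Decidable (Pre_generate_default_chairs canvas_width canvas_height student_count) := by unfold Pre_generate_default_chairs; infer_instance
def pvWitness_generate_default_chairs : Int × Int × Int := (800, 600, 5)


def Spec_generate_default_chairs (canvas_width : Int) (canvas_height : Int) (student_count : Int) (out : List (List (String × Int))) : Prop := out = generate_default_chairs_alt canvas_width canvas_height student_count
instance (canvas_width : Int) (canvas_height : Int) (student_count : Int) (out : List (List (String × Int))) : Decidable (Spec_generate_default_chairs canvas_width canvas_height student_count out) := by unfold Spec_generate_default_chairs; infer_instance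

-- ===== CLAIM (what is proved, stated in full; the proofs are below) =====
def Claim_equal_generate_default_chairs : Prop := ∀ (canvas_width : Int) (canvas_height : Int) (student_count : Int), Dom_generate_default_chairs canvas_width canvas_height student_count → Pre_generate_default_chairs canvas_width canvas_height student_count → Spec_generate_default_chairs canvas_width canvas_height student_count (generate_default_chairs canvas_width canvas_height student_count)

-- ===== LEMMAS AND PROOFS =====

-- the chair B builds for index i
def pvChair (sx sy m i : Int) : List (String × Int) :=
  [("id", i + 1), ("x", sx + (PySem.Int.mod i m) * 140), ("y", sy + (PySem.Int.floordiv i m) * 140)]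

lemma pv_divmod_decompose (m k j : Int) (hm : 0 < m) (h0 : 0 ≤ j) (hj : j < m) :
    PySem.Int.floordiv (k * m + j) m = k ∧ PySem.Int.mod (k * m + j) m = j := by
  have hd : PySem.Int.floordiv (k * m + j) m = k := by
    rw [PySem.Int.floordiv_eq_iff_of_pos hm]
    constructor <;> nlinarith
  refine ⟨hd, ?_⟩
  have := PySem.Int.floordiv_mul_add_mod (k * m + j) m
  rw [hd] at this; linarith

lemma pv_ceil_eq (m sc : Int) (hm : 0 < m) :
    -(PySem.Int.floordiv (-sc) m) = PySem.Int.floordiv (sc + m - 1) m := by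
  have hb := (PySem.Int.floordiv_eq_iff_of_pos (a := sc + m - 1) hm).mp rfl
  rw [PySem.Int.neg_floordiv_neg_eq_iff_of_pos hm]
  constructor <;> nlinarith

lemma pv_inner (sx sy m : Int) (hm : 0 < m) (k : Int) :
    ∀ (t : Nat) (j : Int) (acc : List (List (String × Int))), 0 ≤ j → j + t ≤ m →
    (PySem.List.pyRange j (j + t) 1).foldl
      (fun (st2 : List (List (String × Int)) × Int) col =>
        (st2.1 ++ [[("id", st2.2), ("x", sx + col * 140), ("y", sy + k * 140)]], st2.2 + 1))
      (acc, k * m + j + 1)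
    = (acc ++ (PySem.List.pyRange (k * m + j) (k * m + j + t) 1).map (pvChair sx sy m),
       k * m + j + t + 1) := by
  intro t
  induction t with
  | zero =>
      intro j acc h0 hjm
      simp [PySem.List.pyRange_one_eq_nil (by omega : (j : Int) + 0 ≤ j),
            PySem.List.pyRange_one_eq_nil (by omega : k * m + j + 0 ≤ k * m + j)]
  | succ t ih =>
      intro j acc h0 hjm
      have hjlt : j < m := by push_cast at hjm ⊢; omega
      rw [PySem.List.pyRange_one_cons (by push_cast; omega : j < j + (t + 1 : Nat))]
      rw [List.foldl_cons]
      have hstep : (acc ++ [[("id", k * m + j + 1), ("x", sx + j * 140), ("y", sy + k * 140)]],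
                    k * m + j + 1 + 1)
          = (acc ++ [pvChair sx sy m (k * m + j)], k * m + (j + 1) + 1) := by
        obtain ⟨hd, hmo⟩ := pv_divmod_decompose m k j hm h0 hjlt
        simp [pvChair, hd, hmo]; ring
      simp only [hstep]
      have hrange : (j : Int) + (t + 1 : Nat) = (j + 1) + (t : Nat) := by push_cast; ring
      rw [hrange]
      rw [ih (j + 1) (acc ++ [pvChair sx sy m (k * m + j)]) (by omega) (by push_cast at hjm ⊢; omega)]
      rw [PySem.List.pyRange_one_cons (by push_cast; omega : k * m + j < k * m + j + (t + 1 : Nat))]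
      simp only [List.map_cons, List.append_assoc, List.singleton_append]
      rw [show k * m + (j + 1) + (t : Int) = k * m + j + ((t + 1 : Nat) : Int) by push_cast; ring,
          show k * m + (j + 1) = k * m + j + 1 by ring]

lemma pv_outer (sc sx sy m : Int) (hm : 0 < m) :
    ∀ (k : Nat),
    (PySem.List.pyRange 0 (k : Int) 1).foldl
      (fun (st : List (List (String × Int)) × Int) row =>
        (PySem.List.pyRange 0 (min m (sc - row * m)) 1).foldl
          (fun (st2 : List (List (String × Int)) × Int) col =>
            (st2.1 ++ [[("id", st2.2), ("x", sx + col * 140), ("y", sy + row * 140)]], st2.2 + 1)) st)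
      ([], 1)
    = ((PySem.List.pyRange 0 (max 0 (min ((k : Int) * m) sc)) 1).map (pvChair sx sy m),
       max 0 (min ((k : Int) * m) sc) + 1) := by
  intro k
  induction k with
  | zero =>
      simp [PySem.List.pyRange_one_eq_nil (le_refl (0 : Int))]
  | succ k ih =>
      have hcast : ((k + 1 : Nat) : Int) = (k : Int) + 1 := by push_cast; ring
      rw [hcast, PySem.List.pyRange_one_succ_right (by positivity : (0 : Int) ≤ (k : Int))]
      rw [List.foldl_append, ih]
      have hkm0 : 0 ≤ (k : Int) * m := by positivity
      have hsucc : ((k : Int) + 1) * m = (k : Int) * m + m := by ring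
      simp only [List.foldl_cons, List.foldl_nil]
      by_cases hw : min m (sc - (k : Int) * m) ≤ 0
      · -- this row is empty
        rw [PySem.List.pyRange_one_eq_nil (by omega : min m (sc - (k : Int) * m) ≤ 0)]
        simp only [List.foldl_nil]
        have : max 0 (min (((k : Int) + 1) * m) sc) = max 0 (min ((k : Int) * m) sc) := by
          rw [hsucc]; omega
        rw [this]
      · push_neg at hw
        have hsc : (k : Int) * m < sc := by omega
        have hclk : max 0 (min ((k : Int) * m) sc) = (k : Int) * m := by omega
        rw [hclk]
        set w := min m (sc - (k : Int) * m) with hwdef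
        have hw0 : 0 < w := hw
        have hwm : w ≤ m := min_le_left _ _
        have hwt : w = ((w.toNat : Nat) : Int) := by omega
        have := pv_inner sx sy m hm (k : Int) w.toNat 0
          ((PySem.List.pyRange 0 ((k : Int) * m) 1).map (pvChair sx sy m))
          (le_refl 0) (by omega)
        simp only [zero_add, add_zero] at this
        rw [← hwt] at this
        rw [this]
        have hcl : max 0 (min (((k : Int) + 1) * m) sc) = (k : Int) * m + w := by
          rw [hsucc]; omega
        rw [hcl]
        rw [← List.map_append,
            ← PySem.List.pyRange_one_append 0 ((k : Int) * m) ((k : Int) * m + w) hkm0 (by omega)]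

theorem generate_default_chairs_spec : Claim_equal_generate_default_chairs := by
  intro cw ch sc _ hpre
  unfold Pre_generate_default_chairs at hpre
  unfold Spec_generate_default_chairs
  unfold generate_default_chairs generate_default_chairs_alt
  simp only [show ((120:Int) + 20) = 140 from rfl]
  set m := PySem.Int.floordiv (cw - 20) 140 with hmdef
  rcases lt_or_gt_of_ne hpre with hm | hm
  · -- m < 0 : A's rows are all empty, B returns []
    rw [if_pos (le_of_lt hm)]
    have hconst : ∀ (st : List (List (String × Int)) × Int) (row : Int),
        (PySem.List.pyRange 0 (min m (sc - row * m)) 1).foldl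
          (fun (st2 : List (List (String × Int)) × Int) col =>
            (st2.1 ++ [[("id", st2.2),
                        ("x", PySem.Int.floordiv (cw - (min m sc * 140 - 20)) 2 + col * 140),
                        ("y", PySem.Int.floordiv (ch - (PySem.Int.floordiv (sc + m - 1) m * 140 - 20)) 2 + row * 140)]],
             st2.2 + 1)) st = st := by
      intro st row
      rw [PySem.List.pyRange_one_eq_nil (le_trans (min_le_left _ _) (le_of_lt hm))]
      rfl
    rw [List.foldl_fixed' (fun b => hconst ([], 1) b)]
  · -- m > 0
    rw [if_neg (by omega)]
    set n := PySem.Int.floordiv (sc + m - 1) m with hndef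
    have hceil : -(PySem.Int.floordiv (-sc) m) = n := pv_ceil_eq m sc hm
    rw [hceil]
    set sx := PySem.Int.floordiv (cw - (min m sc * 140 - 20)) 2 with hsxdef
    set sy := PySem.Int.floordiv (ch - (n * 140 - 20)) 2 with hsydef
    have hb := (PySem.Int.floordiv_eq_iff_of_pos (a := sc + m - 1) hm).mp hndef.symm
    by_cases hsc : sc ≤ 0
    · -- no students: both empty
      have hn0 : n ≤ 0 := by nlinarith [hb.1, hb.2]
      rw [PySem.List.pyRange_one_eq_nil hn0, PySem.List.pyRange_one_eq_nil hsc]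
      simp
    · push_neg at hsc
      have hn1 : 0 ≤ n := by nlinarith [hb.1, hb.2]
      have hnsc : sc ≤ n * m := by nlinarith [hb.2]
      have hn : n = ((n.toNat : Nat) : Int) := by omega
      rw [hn, pv_outer sc sx sy m hm n.toNat, ← hn]
      have : max 0 (min (n * m) sc) = sc := by omega
      rw [this]
      simp [PySem.List.pyRange_one, pvChair]
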